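-- pv_equiv track=rewrite | github.com/tazreimers/flying-the-radar | src/market_pdf_insights/llm_client.py | _infer_market_stance
-- ===== SOURCE A (Python) =====
-- _BULLISH_TERMS = [
--     "attractive",
--     "benefit",
--     "growth",
--     "improvement",
--     "opportunity",
--     "outperform",
--     "recovery",
--     "resilient",
--     "tailwind",
--     "upgrade",
--     "upside",
-- ]
--
-- _BEARISH_TERMS = [
--     "decline",
--     "downgrade",
--     "downside",
--     "headwind",
--     "pressure",
--     "restrictive",
--     "risk",
--     "risks",
--     "uncertain",
--     "volatility",
--     "weakness",
-- ]
--
-- def _infer_market_stance(text: str) -> str: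
--     """Infer a coarse market stance from bullish and bearish language."""
--
--     lowered = text.lower()
--     bullish_count = sum(lowered.count(term) for term in _BULLISH_TERMS)
--     bearish_count = sum(lowered.count(term) for term in _BEARISH_TERMS)
--     if bullish_count and bearish_count:
--         return "mixed"
--     if bullish_count:
--         return "bullish"
--     if bearish_count:
--         return "bearish"
--     return "neutral" if lowered.strip() else "unclear"
-- ===== SOURCE B (Python) =====
-- _BULLISH_TERMS = [
--     "attractive",
--     "benefit",
--     "growth",
--     "improvement",
--     "opportunity",
--     "outperform",
--     "recovery",
--     "resilient",
--     "tailwind",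
--     "upgrade",
--     "upside",
-- ]
--
-- _BEARISH_TERMS = [
--     "decline",
--     "downgrade",
--     "downside",
--     "headwind",
--     "pressure",
--     "restrictive",
--     "risk",
--     "risks",
--     "uncertain",
--     "volatility",
--     "weakness",
-- ]
--
--
-- def _infer_market_stance(text: str) -> str:
--     """Infer a coarse market stance from bullish and bearish language."""
--
--     lowered = text.lower()
--     # Single fused left-to-right scan over the text positions: at each index we
--     # test prefix matches for both vocabularies and track whether any
--     # non-whitespace character was seen, so no separate count/strip passes run.
--     has_bullish = has_bearish = has_content = False
--     for i in range(len(lowered)):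
--         if not lowered[i].isspace():
--             has_content = True
--         if not has_bullish and any(lowered.startswith(t, i) for t in _BULLISH_TERMS):
--             has_bullish = True
--         if not has_bearish and any(lowered.startswith(t, i) for t in _BEARISH_TERMS):
--             has_bearish = True
--     if has_bullish and has_bearish:
--         return "mixed"
--     if has_bullish:
--         return "bullish"
--     if has_bearish:
--         return "bearish"
--     return "neutral" if has_content else "unclear"
-- ===== Notes on version B (the rewrite author's own statement) =====
-- stated objective: alternative
-- what changed: Replaces A's staged library passes (22 full-text .count() scans summed, then a .strip() pass) with one fused left-to-right scan over text positions that tests prefix matches at each index and tracks a non-whitespace flag, deciding the stance from the three accumulated booleans.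
import Mathlib
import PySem

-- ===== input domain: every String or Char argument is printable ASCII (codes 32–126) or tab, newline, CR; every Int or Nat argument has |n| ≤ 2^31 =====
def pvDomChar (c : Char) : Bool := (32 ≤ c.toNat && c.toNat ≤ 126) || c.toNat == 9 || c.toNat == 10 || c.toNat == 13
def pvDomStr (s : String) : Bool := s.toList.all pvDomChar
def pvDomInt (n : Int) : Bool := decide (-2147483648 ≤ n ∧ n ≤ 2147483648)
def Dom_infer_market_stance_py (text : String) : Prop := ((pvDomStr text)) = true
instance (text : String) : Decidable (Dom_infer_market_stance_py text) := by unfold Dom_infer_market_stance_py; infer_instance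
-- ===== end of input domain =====

-- B replaces A's staged library passes (22 summed .count scans, then .strip) by ONE fused
-- left-to-right scan over text positions accumulating three booleans; alternative decomposition.

def bullishTerms : List String :=
  ["attractive", "benefit", "growth", "improvement", "opportunity", "outperform",
   "recovery", "resilient", "tailwind", "upgrade", "upside"]

def bearishTerms : List String :=
  ["decline", "downgrade", "downside", "headwind", "pressure", "restrictive",
   "risk", "risks", "uncertain", "volatility", "weakness"]

-- ===== PORT A =====
def infer_market_stance_py (text : String) : String :=
  let lowered := PySem.Str.lower text
  let bullish_count := (bullishTerms.map (fun term => PySem.Str.count lowered term)).sum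
  let bearish_count := (bearishTerms.map (fun term => PySem.Str.count lowered term)).sum
  if bullish_count ≠ 0 ∧ bearish_count ≠ 0 then "mixed"
  else if bullish_count ≠ 0 then "bullish"
  else if bearish_count ≠ 0 then "bearish"
  else if PySem.Str.strip lowered ≠ "" then "neutral" else "unclear"

-- ===== PORT B =====
-- the fused scan: at each position test prefix matches for both vocabularies and
-- record whether a non-whitespace character was seen (mirrors Source B's single for-loop)
def scanStance : List Char → Bool → Bool → Bool → Bool × Bool × Bool
  | [], hb, hr, hc => (hb, hr, hc)
  | ch :: rest, hb, hr, hc =>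
      let hc' := hc || !(PySem.Chars.isspace ch)
      let hb' := hb || bullishTerms.any (fun t => PySem.Chars.startswith (ch :: rest) t.toList)
      let hr' := hr || bearishTerms.any (fun t => PySem.Chars.startswith (ch :: rest) t.toList)
      scanStance rest hb' hr' hc'

def infer_market_stance_py_alt (text : String) : String :=
  let lowered := PySem.Chars.lower text.toList
  let res := scanStance lowered false false false
  if res.1 && res.2.1 then "mixed"
  else if res.1 then "bullish"
  else if res.2.1 then "bearish"
  else if res.2.2 then "neutral" else "unclear"

-- ===== PRECONDITION & SPEC =====
def Spec_infer_market_stance_py (text : String) (out : String) : Prop := out = infer_market_stance_py_alt text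
instance (text : String) (out : String) : Decidable (Spec_infer_market_stance_py text out) := by unfold Spec_infer_market_stance_py; infer_instance

-- ===== CLAIM =====
def Claim_equal_infer_market_stance_py : Prop := ∀ (text : String), Dom_infer_market_stance_py text → Spec_infer_market_stance_py text (infer_market_stance_py text)

-- ===== LEMMAS AND PROOFS =====

-- acc is a lower bound of the count loop's accumulator
lemma count_go_le (sub : List Char) :
    ∀ (fuel : Nat) (l : List Char) (acc : Nat), acc ≤ PySem.Chars.count.go sub fuel l acc := by
  intro fuel
  induction fuel with
  | zero => intro l acc; simp [PySem.Chars.count.go]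
  | succ n ih =>
    intro l acc
    cases l with
    | nil => simp [PySem.Chars.count.go]
    | cons h t =>
      simp only [PySem.Chars.count.go]
      split
      · exact le_trans (Nat.le_succ acc) (ih _ _)
      · exact ih _ _

-- the count loop returns its accumulator unchanged iff no occurrence of sub remains
lemma count_go_eq_acc_iff (sub : List Char) (hsub : sub ≠ []) :
    ∀ (fuel : Nat) (l : List Char), l.length ≤ fuel → ∀ (acc : Nat),
      (PySem.Chars.count.go sub fuel l acc = acc ↔ ¬ ∃ j, sub <+: l.drop j) := by
  intro fuel
  induction fuel with
  | zero =>
    intro l hl acc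
    have : l = [] := List.eq_nil_of_length_eq_zero (Nat.le_zero.mp hl)
    subst this
    simp [PySem.Chars.count.go, List.drop_nil, List.prefix_nil, hsub]
  | succ n ih =>
    intro l hl acc
    cases l with
    | nil => simp [PySem.Chars.count.go, List.drop_nil, List.prefix_nil, hsub]
    | cons h t =>
      simp only [PySem.Chars.count.go]
      split
      · rename_i hpre
        constructor
        · intro heq
          have hle := count_go_le sub n (List.drop sub.length (h :: t)) (acc + 1)
          omega
        · intro hno
          exfalso
          exact hno ⟨0, by simpa using List.isPrefixOf_iff_prefix.mp hpre⟩
      · rename_i hpre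
        have ht : t.length ≤ n := by simpa using hl
        rw [ih t ht acc]
        constructor
        · intro hno ⟨j, hj⟩
          cases j with
          | zero =>
            simp only [List.drop_zero] at hj
            exact hpre (List.isPrefixOf_iff_prefix.mpr hj)
          | succ k => exact hno ⟨k, by simpa using hj⟩
        · intro hno ⟨j, hj⟩
          exact hno ⟨j + 1, by simpa using hj⟩

-- a nonzero Python count is exactly substring membership
lemma count_ne_zero_iff_isIn (s sub : List Char) (hsub : sub ≠ []) :
    PySem.Chars.count s sub ≠ 0 ↔ PySem.Chars.isIn sub s = true := by
  rw [← PySem.Chars.exists_prefix_drop_iff_isIn]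
  unfold PySem.Chars.count
  simp only [List.isEmpty_iff, hsub, if_false]
  rw [← not_iff_not, not_not, count_go_eq_acc_iff sub hsub s.length s le_rfl 0]

-- the sum of all per-term counts is nonzero iff some term occurs
lemma sum_counts_ne_zero_iff (terms : List String) (h : ∀ t ∈ terms, t.toList ≠ []) (L : List Char) :
    ((terms.map (fun term => PySem.Chars.count L term.toList)).sum ≠ 0) ↔
      terms.any (fun term => PySem.Chars.isIn term.toList L) = true := by
  induction terms with
  | nil => simp
  | cons t ts ih =>
    simp only [List.map_cons, List.sum_cons, List.any_cons, Bool.or_eq_true, Nat.add_eq_zero_iff,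
      ne_eq, not_and_or]
    rw [← ih (fun x hx => h x (List.mem_cons_of_mem _ hx))]
    have := count_ne_zero_iff_isIn L t.toList (h t (List.mem_cons_self ..))
    simp only [ne_eq] at *
    tauto

-- substring membership unfolds one character: a match starts here or strictly later
lemma any_isIn_cons (terms : List String) (ch : Char) (rest : List Char) :
    terms.any (fun t => PySem.Chars.isIn t.toList (ch :: rest)) =
      (terms.any (fun t => PySem.Chars.startswith (ch :: rest) t.toList) ||
       terms.any (fun t => PySem.Chars.isIn t.toList rest)) := by
  rw [Bool.eq_iff_iff]
  simp only [List.any_eq_true, Bool.or_eq_true, PySem.Chars.isIn_iff_infix,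
    PySem.Chars.startswith_iff, List.infix_cons_iff]
  constructor
  · rintro ⟨t, ht, h | h⟩
    · exact Or.inl ⟨t, ht, h⟩
    · exact Or.inr ⟨t, ht, by simpa [PySem.Chars.isIn_iff_infix] using h⟩
  · rintro (⟨t, ht, h⟩ | ⟨t, ht, h⟩)
    · exact ⟨t, ht, Or.inl h⟩
    · exact ⟨t, ht, Or.inr (by simpa [PySem.Chars.isIn_iff_infix] using h)⟩

-- closed form of the fused scan
lemma scanStance_eq (l : List Char) : ∀ (hb hr hc : Bool),
    scanStance l hb hr hc =
      (hb || bullishTerms.any (fun t => PySem.Chars.isIn t.toList l),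
       hr || bearishTerms.any (fun t => PySem.Chars.isIn t.toList l),
       hc || !(l.all PySem.Chars.isspace)) := by
  induction l with
  | nil =>
    intro hb hr hc
    have h1 : bullishTerms.any (fun t => PySem.Chars.isIn t.toList ([] : List Char)) = false := by decide
    have h2 : bearishTerms.any (fun t => PySem.Chars.isIn t.toList ([] : List Char)) = false := by decide
    simp [scanStance, h1, h2]
  | cons ch rest ih =>
    intro hb hr hc
    simp only [scanStance, ih, any_isIn_cons, List.all_cons]
    refine Prod.ext ?_ (Prod.ext ?_ ?_) <;> simp [Bool.or_assoc]

-- dropping a satisfied prefix does not change whether all elements satisfy p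
lemma all_dropWhile_eq {α : Type} (p : α → Bool) (l : List α) :
    (List.dropWhile p l).all p = l.all p := by
  induction l with
  | nil => rfl
  | cons h t ih => by_cases hp : p h = true <;> simp [hp, ih]

-- Python strip is empty exactly when the string is all whitespace
lemma strip_eq_nil_iff (l : List Char) :
    PySem.Chars.strip l = [] ↔ l.all PySem.Chars.isspace = true := by
  unfold PySem.Chars.strip PySem.Chars.rstrip PySem.Chars.lstrip
  rw [List.reverse_eq_nil_iff, List.dropWhile_eq_nil_iff]
  constructor
  · intro h
    rw [← all_dropWhile_eq PySem.Chars.isspace l, List.all_eq_true]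
    intro x hx
    exact h x (by simpa using hx)
  · intro h x hx
    have := (List.all_eq_true.mp ((all_dropWhile_eq PySem.Chars.isspace l).symm ▸ h))
    exact this x (by simpa using hx)

-- ===== VERDICT =====
theorem infer_market_stance_py_spec : Claim_equal_infer_market_stance_py := by
  intro text _
  unfold Spec_infer_market_stance_py infer_market_stance_py infer_market_stance_py_alt
  simp only [PySem.Str.count_eq, PySem.Str.toList_lower, scanStance_eq]
  have hbull := sum_counts_ne_zero_iff bullishTerms (by decide) (PySem.Chars.lower text.toList)
  have hbear := sum_counts_ne_zero_iff bearishTerms (by decide) (PySem.Chars.lower text.toList)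
  have hstrip : (PySem.Str.strip (PySem.Str.lower text) ≠ "") ↔
      ¬ (PySem.Chars.lower text.toList).all PySem.Chars.isspace = true := by
    rw [← strip_eq_nil_iff]
    have hnil : (PySem.Str.strip (PySem.Str.lower text) = "") ↔
        (PySem.Str.strip (PySem.Str.lower text)).toList = [] := by
      rw [← String.toList_inj]; rfl
    rw [not_iff_not, hnil, PySem.Str.toList_strip, PySem.Str.toList_lower]
  cases hB : bullishTerms.any (fun term => PySem.Chars.isIn term.toList (PySem.Chars.lower text.toList)) <;>
  cases hR : bearishTerms.any (fun term => PySem.Chars.isIn term.toList (PySem.Chars.lower text.toList)) <;>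
  rw [hB] at hbull <;> rw [hR] at hbear <;>
  simp only [Bool.false_eq_true, iff_false, not_not, iff_true, ne_eq] at hbull hbear <;>
  cases hW : (PySem.Chars.lower text.toList).all PySem.Chars.isspace <;>
  simp [hbull, hbear, hW, hstrip]
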